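-- pv_equiv track=rewrite | github.com/jk-jung/problem-solving | codewars/6kyu/6_Simple Fun #162: Pair Wise.py | pairwise
-- ===== SOURCE A (Python) =====
-- from collections import defaultdict
--
-- def pairwise(v, n):
--     c = defaultdict(list)
--     for i, x in enumerate(v):
--         c[x].append(i)
--     r = 0
--     for k, v in list(c.items()):
--         if k * 2 == n:
--             r += sum(v[:len(v) - len(v) % 2])
--         elif k * 2 < n:
--             u = c[n - k]
--             r += sum(sum(x) for x in zip(v, u))
--     return r
-- ===== SOURCE B (Python) =====
-- def pairwise(v, n):
--     r = 0
--     for i, x in enumerate(v):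
--         if 2 * x == n:
--             c = v.count(x)
--             bound = c - c % 2
--         else:
--             bound = v.count(n - x)
--         if v[:i].count(x) < bound:
--             r += i
--     return r
-- ===== Notes on version B (the rewrite author's own statement) =====
-- stated objective: simpler
-- what changed: Replaces A's defaultdict grouping pass plus a second loop over dict items with zip/slice pairing by a single loop that decides each index's contribution directly from occurrence counts (rank of the value so far vs. number of complementary partners), with no dict, zip or slicing of index lists.
import Mathlib
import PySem

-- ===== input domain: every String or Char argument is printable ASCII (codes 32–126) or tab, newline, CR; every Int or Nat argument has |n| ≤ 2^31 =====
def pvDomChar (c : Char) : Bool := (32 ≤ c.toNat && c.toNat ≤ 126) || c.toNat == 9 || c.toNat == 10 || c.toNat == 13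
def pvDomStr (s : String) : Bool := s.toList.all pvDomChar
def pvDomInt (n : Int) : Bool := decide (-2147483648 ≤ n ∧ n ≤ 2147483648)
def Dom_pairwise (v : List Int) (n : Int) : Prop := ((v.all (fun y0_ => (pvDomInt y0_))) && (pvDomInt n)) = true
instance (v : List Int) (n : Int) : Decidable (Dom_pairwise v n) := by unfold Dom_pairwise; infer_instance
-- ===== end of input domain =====

-- B replaces A's group-by-dict + zip/slice pairing with one per-index count-based test; objective: simpler.

-- ===== PORT A =====
-- A builds c : value ↦ list of its indices (defaultdict(list)), then sums per key:
-- for 2k == n the even prefix of c[k]; for 2k < n the zipped index sums with c[n-k].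
-- Inside A's second loop 'c[n-k]' on a missing key inserts an empty list into c but the
-- loop runs over the snapshot list(c.items()) and every later read of such a key yields [],
-- identical to 'getD _ []' on the pre-loop dict: reading through the pre-loop dict is exact.
def pairwise (v : List Int) (n : Int) : Int :=
  let c := (PySem.List.enumerate v 0).foldl
    (fun d p => d.modify p.2 [] (· ++ [p.1])) PySem.Dict.empty
  c.items.foldl
    (fun r kv =>
      if kv.1 * 2 == n then
        r + (PySem.List.slice kv.2 none (some ((kv.2.length : Int) - PySem.Int.mod (kv.2.length : Int) 2))).sum
      else if kv.1 * 2 < n then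
        r + ((kv.2.zip (c.getD (n - kv.1) [])).map (fun p => p.1 + p.2)).sum
      else r) 0

-- ===== PORT B =====
-- B: one pass over enumerate(v); index i of value x contributes iff the number of earlier
-- occurrences of x is below its partner bound (even count for 2x == n, count of n-x otherwise).
def pairwise_alt (v : List Int) (n : Int) : Int :=
  (PySem.List.enumerate v 0).foldl
    (fun r p =>
      let bound : Int :=
        if 2 * p.2 == n then
          (v.count p.2 : Int) - PySem.Int.mod (v.count p.2 : Int) 2
        else (v.count (n - p.2) : Int)
      if ((PySem.List.slice v none (some p.1)).count p.2 : Int) < bound then r + p.1 else r) 0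

-- ===== PRECONDITION & SPEC =====
def Spec_pairwise (v : List Int) (n : Int) (out : Int) : Prop := out = pairwise_alt v n
instance (v : List Int) (n : Int) (out : Int) : Decidable (Spec_pairwise v n out) := by unfold Spec_pairwise; infer_instance

-- ===== CLAIM (what is proved, stated in full; the proofs are below) =====
def Claim_equal_pairwise : Prop := ∀ (v : List Int) (n : Int), Dom_pairwise v n → Spec_pairwise v n (pairwise v n)

-- ===== LEMMAS AND PROOFS =====

def occI (v : List Int) (k : Int) : List Int :=
  (((PySem.List.enumerate v 0).filter (fun p => p.2 == k)).map (·.1))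

theorem occI_length (v : List Int) (k : Int) : (occI v k).length = v.count k := by
  calc (occI v k).length
      = (PySem.List.enumerate v 0).countP (fun p => p.2 == k) := by
        simp [occI, List.countP_eq_length_filter]
    _ = ((PySem.List.enumerate v 0).map (·.2)).count k := by
        rw [List.count, List.countP_map]; rfl
    _ = v.count k := by rw [PySem.List.map_snd_enumerate]

theorem getD_c (v : List Int) (k : Int) :
    (((PySem.List.enumerate v 0).foldl
        (fun d p => d.modify p.2 [] (· ++ [p.1])) PySem.Dict.empty).getD k [])
      = occI v k := by
  have hmap : (PySem.List.enumerate v 0).foldl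
      (fun d p => d.modify p.2 [] (· ++ [p.1])) PySem.Dict.empty
      = ((PySem.List.enumerate v 0).map Prod.swap).foldl
          (fun d q => d.modify q.1 [] (· ++ [q.2])) PySem.Dict.empty := by
    rw [List.foldl_map]; rfl
  rw [hmap, PySem.Dict.getD_foldl_modify_append]
  simp [occI, List.filter_map, Function.comp_def, Prod.swap]

theorem keys_c (v : List Int) :
    (((PySem.List.enumerate v 0).foldl
        (fun d p => d.modify p.2 [] (· ++ [p.1])) PySem.Dict.empty).keys)
      = PySem.List.dedup v := by
  rw [PySem.Dict.keys_foldl_modify_key (key := fun p : Int × Int => p.2)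
    (f := fun _ p => (· ++ [p.1]))]
  simp [PySem.List.map_snd_enumerate, PySem.Set.update_nil_left]

theorem nodup_keys_c (v : List Int) :
    (((PySem.List.enumerate v 0).foldl
        (fun d p => d.modify p.2 [] (· ++ [p.1])) PySem.Dict.empty).keys).Nodup := by
  exact PySem.Dict.nodup_keys_foldl_modify_key _ (fun p : Int × Int => p.2) _
    (fun _ p => (· ++ [p.1])) _ (by simp [PySem.Dict.keys_empty])

theorem items_c (v : List Int) :
    (((PySem.List.enumerate v 0).foldl
        (fun d p => d.modify p.2 [] (· ++ [p.1])) PySem.Dict.empty).items)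
      = (PySem.List.dedup v).map (fun k => (k, occI v k)) := by
  rw [PySem.Dict.items_eq_map_keys _ (nodup_keys_c v) [], keys_c]
  exact List.map_congr_left (fun k _ => by rw [getD_c])

def bnd (v : List Int) (n k : Int) : Nat :=
  if 2 * k = n then v.count k - v.count k % 2 else v.count (n - k)

def Hc (v : List Int) (n k : Int) : Int := ((occI v k).take (bnd v n k)).sum

def gA (v : List Int) (n k : Int) : Int :=
  if 2 * k = n then Hc v n k else if 2 * k < n then Hc v n k + Hc v n (n - k) else 0

theorem ZipSum (xs ys : List Int) :
    ((xs.zip ys).map (fun p => p.1 + p.2)).sum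
      = (xs.take ys.length).sum + (ys.take xs.length).sum := by
  induction xs generalizing ys with
  | nil => simp
  | cons x xs ih =>
      cases ys with
      | nil => simp
      | cons y ys => simp [ih]; ring

theorem evenTake (l : List Int) :
    (PySem.List.slice l none (some ((l.length : Int) - PySem.Int.mod (l.length : Int) 2))).sum
      = (l.take (l.length - l.length % 2)).sum := by
  have h : ((l.length : Int) - PySem.Int.mod (l.length : Int) 2)
      = ((l.length - l.length % 2 : Nat) : Int) := by
    rw [PySem.Int.mod_eq_emod_of_pos (by norm_num)]
    omega
  rw [h, PySem.List.slice_to_natCast]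

theorem A_eq_sum (v : List Int) (n : Int) :
    pairwise v n = ((PySem.List.dedup v).map (fun k => gA v n k)).sum := by
  simp only [pairwise]
  rw [items_c, List.foldl_map]
  simp only [getD_c]
  have hfun : (fun (r : Int) (k : Int) =>
      if k * 2 == n then
        r + (PySem.List.slice (occI v k) none
          (some (((occI v k).length : Int) - PySem.Int.mod ((occI v k).length : Int) 2))).sum
      else if k * 2 < n then
        r + (((occI v k).zip (occI v (n - k))).map (fun p => p.1 + p.2)).sum
      else r)
      = (fun (r : Int) (k : Int) => r + gA v n k) := by
    funext r k
    simp only [gA, Hc, bnd, beq_iff_eq]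
    split_ifs with h1 h2 h3 h4 h5 h6 <;> try omega
    · rw [evenTake, occI_length]
    · rw [ZipSum]
      have hnk : n - (n - k) = k := by ring
      simp only [hnk, occI_length]
  rw [hfun, PySem.List.foldl_add]
  simp

theorem occI_append (v : List Int) (x k : Int) :
    occI (v ++ [x]) k = occI v k ++ (if x == k then [((v.length : Nat) : Int)] else []) := by
  simp [occI, PySem.List.enumerate_append, PySem.List.enumerate_cons, PySem.List.enumerate_nil,
    List.filter_append]
  split <;> simp_all

def hB (v : List Int) (n : Int) (p : Int × Int) : Int :=
  if ((PySem.List.slice v none (some p.1)).count p.2 : Int) < ((bnd v n p.2 : Nat) : Int)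
  then p.1 else 0

theorem bnd_int (v : List Int) (n x : Int) :
    ((bnd v n x : Nat) : Int)
      = if 2 * x == n then (v.count x : Int) - PySem.Int.mod (v.count x : Int) 2
        else (v.count (n - x) : Int) := by
  simp only [bnd, beq_iff_eq]
  split_ifs with h
  · rw [PySem.Int.mod_eq_emod_of_pos (by norm_num)]; omega
  · rfl

theorem B_eq_sum (v : List Int) (n : Int) :
    pairwise_alt v n = ((PySem.List.enumerate v 0).map (hB v n)).sum := by
  unfold pairwise_alt
  have hfun : (fun (r : Int) (p : Int × Int) =>
      let bound : Int :=
        if 2 * p.2 == n then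
          (v.count p.2 : Int) - PySem.Int.mod (v.count p.2 : Int) 2
        else (v.count (n - p.2) : Int)
      if ((PySem.List.slice v none (some p.1)).count p.2 : Int) < bound then r + p.1 else r)
      = (fun (r : Int) (p : Int × Int) => r + hB v n p) := by
    funext r p
    simp only [hB, ← bnd_int]
    split_ifs <;> omega
  rw [hfun, PySem.List.foldl_add]
  simp

theorem fiber_sum (v : List Int) (k : Int) (B : Nat) :
    ((((PySem.List.enumerate v 0).filter (fun p => p.2 == k)).map
        (fun p => if ((PySem.List.slice v none (some p.1)).count k : Int) < (B : Int)
                  then p.1 else 0)).sum)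
      = ((occI v k).take B).sum := by
  induction v using List.reverseRecOn with
  | nil => simp [occI]
  | append_singleton v x ih =>
      have hE : PySem.List.enumerate (v ++ [x]) 0
          = PySem.List.enumerate v 0 ++ [((v.length : Int), x)] := by
        rw [PySem.List.enumerate_append]
        simp [PySem.List.enumerate_cons, PySem.List.enumerate_nil]
      have hcongr : ∀ p ∈ (PySem.List.enumerate v 0).filter (fun p => p.2 == k),
          (if ((PySem.List.slice (v ++ [x]) none (some p.1)).count k : Int) < (B : Int)
           then p.1 else 0)
          = (if ((PySem.List.slice v none (some p.1)).count k : Int) < (B : Int)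
             then p.1 else 0) := by
        intro p hp
        have hpE := (List.mem_filter.mp hp).1
        obtain ⟨j, hj, hpj⟩ := (PySem.List.mem_enumerate_iff _ _ _).mp hpE
        subst hpj
        have h0 : ((0 : Int) + (j : Int)) = ((j : Int)) := by ring
        simp only [h0, PySem.List.slice_to_natCast,
          List.take_append_of_le_length (le_of_lt hj)]
      rw [hE, List.filter_append, List.map_append, List.sum_append,
        List.map_congr_left hcongr, ih, occI_append]
      by_cases hxk : x = k
      · simp only [hxk, BEq.rfl, if_true]
        have hsl : PySem.List.slice (v ++ [k]) none (some ((v.length : Nat) : Int))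
            = v := by
          rw [PySem.List.slice_to_natCast, List.take_append_of_le_length (le_refl _),
            List.take_length]
        rw [List.take_append]
        simp only [List.filter_cons, List.filter_nil, occI_length]
        by_cases hlt : v.count k < B
        · obtain ⟨m, hm⟩ : ∃ m, B - v.count k = m + 1 := ⟨B - v.count k - 1, by omega⟩
          simp [hsl, hm, hlt, List.sum_append]
        · have hm : B - v.count k = 0 := by omega
          simp [hsl, hm, hlt]
      · have hbeq : (x == k) = false := by simp [hxk]
        simp [hbeq]

theorem occI_nil (v : List Int) (k : Int) (h : k ∉ v) : occI v k = [] := by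
  have hl := occI_length v k
  rw [List.count_eq_zero_of_not_mem h] at hl
  exact List.length_eq_zero_iff.mp hl

theorem fiber_sum_hB (v : List Int) (n k : Int) :
    (((PySem.List.enumerate v 0).filter (fun p => p.2 == k)).map (hB v n)).sum
      = Hc v n k := by
  rw [List.map_congr_left (g := fun p : Int × Int =>
      if ((PySem.List.slice v none (some p.1)).count k : Int) < ((bnd v n k : Nat) : Int)
      then p.1 else 0)
    (fun p hp => by
      have hk : p.2 = k := by simpa using (List.mem_filter.mp hp).2
      simp [hB, hk])]
  exact fiber_sum v k (bnd v n k)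

theorem nodup_enumerate (v : List Int) : (PySem.List.enumerate v 0).Nodup := by
  have h := PySem.List.pairwise_lt_enumerate v (0 : Int)
  exact h.imp (fun hlt => by intro he; rw [he] at hlt; exact lt_irrefl _ hlt)

theorem B_eq_fibers (v : List Int) (n : Int) :
    pairwise_alt v n = ((PySem.List.dedup v).map (fun k => Hc v n k)).sum := by
  rw [B_eq_sum, ← List.sum_toFinset _ (nodup_enumerate v)]
  have hmap : ∀ p ∈ (PySem.List.enumerate v 0).toFinset, p.2 ∈ v.toFinset := by
    intro p hp
    rw [List.mem_toFinset] at hp ⊢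
    rw [← PySem.List.map_snd_enumerate v 0]
    exact List.mem_map_of_mem hp
  rw [← Finset.sum_fiberwise_of_maps_to hmap (fun p => hB v n p)]
  have hfib : ∀ k, (∑ p ∈ (PySem.List.enumerate v 0).toFinset.filter (fun p => p.2 = k),
      hB v n p) = Hc v n k := by
    intro k
    have he : (PySem.List.enumerate v 0).toFinset.filter (fun p => p.2 = k)
        = ((PySem.List.enumerate v 0).filter (fun p => p.2 == k)).toFinset := by
      rw [List.toFinset_filter]
      simp
    rw [he, List.sum_toFinset _ ((nodup_enumerate v).filter _), fiber_sum_hB]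
  rw [Finset.sum_congr rfl (fun k _ => hfib k)]
  have hvf : v.toFinset = (PySem.List.dedup v).toFinset := by
    ext a; simp
  rw [hvf, List.sum_toFinset _ (PySem.List.nodup_dedup v)]

theorem sum_gA_eq_sum_Hc (v : List Int) (n : Int) :
    ((PySem.List.dedup v).map (fun k => gA v n k)).sum
      = ((PySem.List.dedup v).map (fun k => Hc v n k)).sum := by
  rw [← List.sum_toFinset _ (PySem.List.nodup_dedup v),
      ← List.sum_toFinset _ (PySem.List.nodup_dedup v)]
  have hset : (PySem.List.dedup v).toFinset = v.toFinset := by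
    ext a; simp
  rw [hset]
  have hsplitA : ∀ k, gA v n k
      = ((if 2 * k ≤ n then Hc v n k else 0) + (if 2 * k < n then Hc v n (n - k) else 0)) := by
    intro k
    unfold gA
    by_cases h1 : 2 * k = n
    · rw [if_pos h1, if_pos (show 2 * k ≤ n by omega), if_neg (show ¬ 2 * k < n by omega)]; ring
    · by_cases h2 : 2 * k < n
      · rw [if_neg h1, if_pos h2, if_pos (show 2 * k ≤ n by omega), if_pos h2]
      · rw [if_neg h1, if_neg h2, if_neg (show ¬ 2 * k ≤ n by omega), if_neg h2]; ring
  have hsplitB : ∀ k, Hc v n k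
      = ((if 2 * k ≤ n then Hc v n k else 0) + (if n < 2 * k then Hc v n k else 0)) := by
    intro k
    by_cases h : 2 * k ≤ n
    · rw [if_pos h, if_neg (by omega)]; ring
    · rw [if_neg h, if_pos (by omega)]; ring
  rw [Finset.sum_congr rfl (fun k _ => hsplitA k),
      Finset.sum_congr rfl (fun k _ => hsplitB k),
      Finset.sum_add_distrib, Finset.sum_add_distrib]
  congr 1
  -- ∑ (if 2k<n then Hc (n-k) else 0) = ∑ (if n<2k then Hc k else 0)
  rw [← Finset.sum_filter, ← Finset.sum_filter]
  have hz1 : ∑ k ∈ v.toFinset.filter (fun k => 2 * k < n), Hc v n (n - k)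
      = ∑ k ∈ v.toFinset.filter (fun k => 2 * k < n ∧ n - k ∈ v.toFinset), Hc v n (n - k) := by
    refine (Finset.sum_subset ?_ ?_).symm
    · intro k hk; simp only [Finset.mem_filter] at hk ⊢; exact ⟨hk.1, hk.2.1⟩
    · intro k hk hnk
      simp only [Finset.mem_filter] at hk hnk
      have : n - k ∉ v := by
        intro hmem
        exact hnk ⟨hk.1, hk.2, List.mem_toFinset.mpr hmem⟩
      unfold Hc
      rw [occI_nil v _ this]
      simp
  have hz2 : ∑ k ∈ v.toFinset.filter (fun k => n < 2 * k), Hc v n k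
      = ∑ k ∈ v.toFinset.filter (fun k => n < 2 * k ∧ n - k ∈ v.toFinset), Hc v n k := by
    refine (Finset.sum_subset ?_ ?_).symm
    · intro k hk; simp only [Finset.mem_filter] at hk ⊢; exact ⟨hk.1, hk.2.1⟩
    · intro k hk hnk
      simp only [Finset.mem_filter] at hk hnk
      have hnm : n - k ∉ v := by
        intro hmem
        exact hnk ⟨hk.1, hk.2, List.mem_toFinset.mpr hmem⟩
      unfold Hc bnd
      rw [if_neg (by omega), List.count_eq_zero_of_not_mem hnm]
      simp
  rw [hz1, hz2]
  refine Finset.sum_nbij' (fun k => n - k) (fun k => n - k) ?_ ?_ ?_ ?_ ?_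
  · intro a ha
    simp only [Finset.mem_filter] at ha ⊢
    exact ⟨ha.2.2, by omega, by rw [show n - (n - a) = a by ring]; exact ha.1⟩
  · intro a ha
    simp only [Finset.mem_filter] at ha ⊢
    exact ⟨ha.2.2, by omega, by rw [show n - (n - a) = a by ring]; exact ha.1⟩
  · intro a _; ring
  · intro a _; ring
  · intro a _; rfl

-- ===== VERDICT (by name: the statement is the Claim_ definition above) =====
theorem pairwise_spec : Claim_equal_pairwise := by
  intro v n _
  unfold Spec_pairwise
  rw [A_eq_sum, B_eq_fibers, sum_gA_eq_sum_Hc]
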